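-- pv_equiv track=rewrite | github.com/asmit404/GFG_Solutions | Number following a pattern.py | printMinNumberForPattern
-- ===== SOURCE A (Python) =====
-- def printMinNumberForPattern(S):
--     result = []
--     stack = []
--     num = 1
--     for c in S:
--         stack.append(num)
--         num += 1
--         if c == "I":
--             result += [str(i) for i in stack[::-1]]
--             stack = []
--     stack.append(num)
--     result += [str(i) for i in stack[::-1]]
--     return int(''.join(result))
-- ===== SOURCE B (Python) =====
-- def printMinNumberForPattern(S):
--     # Run-based construction: split S into maximal runs of non-'I' characters;
--     # each run of length d (possibly 0) followed by an 'I' (or end of string)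
--     # contributes the descending block base+d, ..., base.
--     pieces = []
--     base = 1
--     i = 0
--     n = len(S)
--     while i <= n:
--         j = i
--         while j < n and S[j] != 'I':
--             j += 1
--         pieces.extend(range(base + (j - i), base - 1, -1))
--         base = base + (j - i) + 1
--         i = j + 1
--     return int(''.join(map(str, pieces)))
-- ===== Notes on version B (the rewrite author's own statement) =====
-- stated objective: alternative
-- what changed: B replaces A's push-and-flush stack (append each number, dump the stack reversed at every increasing marker) with a run-based construction: it scans each maximal run of decreasing markers once and emits its descending block base+d..base directly from a reversed range, keeping no stack.
import Mathlib
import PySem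

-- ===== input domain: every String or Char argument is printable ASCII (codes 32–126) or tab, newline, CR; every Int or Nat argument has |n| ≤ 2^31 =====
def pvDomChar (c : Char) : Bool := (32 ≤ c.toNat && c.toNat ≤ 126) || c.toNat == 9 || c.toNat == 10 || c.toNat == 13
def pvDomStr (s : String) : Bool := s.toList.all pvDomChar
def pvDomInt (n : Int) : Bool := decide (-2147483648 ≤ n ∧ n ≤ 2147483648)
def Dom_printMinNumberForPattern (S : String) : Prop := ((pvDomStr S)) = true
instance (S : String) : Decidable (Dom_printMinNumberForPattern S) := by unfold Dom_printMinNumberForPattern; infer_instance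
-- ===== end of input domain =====

-- B builds each descending block from a reversed range over maximal non-'I' runs
-- instead of A's push-and-flush stack; objective: alternative (same cost, different structure).

-- ===== PORT A =====
-- loop body of A: stack.append(num); num += 1; if c == "I": flush stack reversed
def pvStepA (acc : List String × List Int × Int) (c : Char) : List String × List Int × Int :=
  match acc with
  | (result, stack, num) =>
    let stack := stack ++ [num]
    let num := num + 1
    if c == 'I' then
      -- stack[::-1] is stack.reverse (PySem.List.slice?_none_none_neg_one)
      (result ++ stack.reverse.map PySem.Int.toStr, ([] : List Int), num)
    else (result, stack, num)

def printMinNumberForPattern (S : String) : Int :=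
  match S.toList.foldl pvStepA (([] : List String), ([] : List Int), (1 : Int)) with
  | (result, stack, num) =>
    let stack := stack ++ [num]
    let result := result ++ stack.reverse.map PySem.Int.toStr
    -- int(''.join(result)): the joined string is nonempty digits, so int() always succeeds
    (PySem.Int.ofStr? (PySem.Str.join "" result)).getD 0

-- ===== PORT B =====
-- outer while loop of B over the remaining suffix of S; the inner while loop
-- computing the run end j is the takeWhile length d
def pvAltLoop (cs : List Char) (base : Int) : List Int :=
  let d := (cs.takeWhile (fun c => c != 'I')).length
  let block := PySem.List.pyRange (base + d) (base - 1) (-1)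
  if _h : cs.length ≤ d then block
  else block ++ pvAltLoop (cs.drop (d + 1)) (base + d + 1)
termination_by cs.length
decreasing_by simp_all; omega

def printMinNumberForPattern_alt (S : String) : Int :=
  let pieces := pvAltLoop S.toList 1
  -- int(''.join(map(str, pieces))): the joined string is nonempty digits, so int() always succeeds
  (PySem.Int.ofStr? (PySem.Str.join "" (pieces.map PySem.Int.toStr))).getD 0

-- ===== PRECONDITION & SPEC =====
def Spec_printMinNumberForPattern (S : String) (out : Int) : Prop := out = printMinNumberForPattern_alt S
instance (S : String) (out : Int) : Decidable (Spec_printMinNumberForPattern S out) := by unfold Spec_printMinNumberForPattern; infer_instance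

-- ===== CLAIM (what is proved, stated in full; the proofs are below) =====
def Claim_equal_printMinNumberForPattern : Prop := ∀ (S : String), Dom_printMinNumberForPattern S → Spec_printMinNumberForPattern S (printMinNumberForPattern S)

-- ===== LEMMAS AND PROOFS =====

-- the Int list A's result encodes: same recursion as A's loop, strings stripped away
def pvMix (st : List Int) (num : Int) : List Char → List Int
  | [] => (st ++ [num]).reverse
  | c :: cs =>
    if c == 'I' then (st ++ [num]).reverse ++ pvMix [] (num + 1) cs
    else pvMix (st ++ [num]) (num + 1) cs

def pvFinish (t : List String × List Int × Int) : List String :=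
  t.1 ++ (t.2.1 ++ [t.2.2]).reverse.map PySem.Int.toStr

theorem pvFoldA_eq_mix (cs : List Char) : ∀ (res : List String) (st : List Int) (num : Int),
    pvFinish (cs.foldl pvStepA (res, st, num)) = res ++ (pvMix st num cs).map PySem.Int.toStr := by
  induction cs with
  | nil => intro res st num; simp [pvFinish, pvMix]
  | cons c cs ih =>
    intro res st num
    rw [List.foldl_cons]
    by_cases hc : c = 'I'
    · have hcb : (c == 'I') = true := by simp [hc]
      have hstep : pvStepA (res, st, num) c
          = (res ++ ((st ++ [num]).reverse.map PySem.Int.toStr), ([] : List Int), num + 1) := by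
        simp [pvStepA, hcb]
      rw [hstep, ih]
      simp [pvMix, hcb]
    · have hcb : (c == 'I') = false := by simp [hc]
      have hstep : pvStepA (res, st, num) c = (res, st ++ [num], num + 1) := by
        simp [pvStepA, hcb]
      rw [hstep, ih]
      simp [pvMix, hcb]

theorem pvMix_run (cs : List Char) : ∀ (st : List Int) (num : Int),
    pvMix st num cs =
      (let d := (cs.takeWhile (fun c => c != 'I')).length
       if cs.length ≤ d then (st ++ PySem.List.pyRange num (num + d + 1) 1).reverse
       else (st ++ PySem.List.pyRange num (num + d + 1) 1).reverse
            ++ pvMix [] (num + d + 1) (cs.drop (d + 1))) := by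
  induction cs with
  | nil =>
    intro st num
    simp [pvMix, PySem.List.pyRange_one_singleton]
  | cons c cs ih =>
    intro st num
    by_cases hc : c = 'I'
    · have hcb : (c == 'I') = true := by simp [hc]
      have hcb' : (c != 'I') = false := by simp [hc]
      simp [pvMix, hcb, hcb', PySem.List.pyRange_one_singleton]
    · have hcb : (c == 'I') = false := by simp [hc]
      have hcb' : (c != 'I') = true := by simp [hc]
      set d' := (cs.takeWhile (fun c => c != 'I')).length with hd'
      have hd : ((c :: cs).takeWhile (fun c => c != 'I')).length = d' + 1 := by
        simp [hcb']
        exact hd'.symm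
      have hAB : (num + 1) + (d' : Int) + 1 = num + ((d' : Int) + 1) + 1 := by ring
      have hrange : (st ++ [num]) ++ PySem.List.pyRange (num + 1) ((num + 1) + (d' : Int) + 1) 1
          = st ++ PySem.List.pyRange num (num + ((d' : Int) + 1) + 1) 1 := by
        rw [List.append_assoc, hAB, PySem.List.pyRange_one_cons (show num < num + ((d' : Int) + 1) + 1 by omega)]
        simp
      have hstep : pvMix st num (c :: cs) = pvMix (st ++ [num]) (num + 1) cs := by
        simp [pvMix, hcb]
      rw [hstep, ih]
      simp only [hd]
      by_cases hlen : cs.length ≤ d'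
      · rw [if_pos hlen, if_pos (by simp; omega)]
        push_cast
        rw [hrange]
      · rw [if_neg hlen, if_neg (by simp; omega)]
        push_cast
        rw [hrange]
        rw [show (d' + 1 + 1 : Nat) = (d' + 1) + 1 from rfl, List.drop_succ_cons]
        congr 2

theorem pvMix_eq_altLoop : ∀ (n : Nat) (cs : List Char), cs.length = n →
    ∀ (num : Int), pvMix [] num cs = pvAltLoop cs num := by
  intro n
  induction n using Nat.strong_induction_on with
  | _ n ih =>
    intro cs hlen num
    rw [pvMix_run, pvAltLoop]
    simp only []
    set d := (cs.takeWhile (fun c => c != 'I')).length with hd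
    have hrev : PySem.List.pyRange (num + ↑d) (num - 1) (-1)
        = (PySem.List.pyRange num (num + ↑d + 1) 1).reverse := by
      rw [PySem.List.pyRange_neg_one_eq_reverse]
      congr 1; ring_nf
    by_cases hle : cs.length ≤ d
    · rw [if_pos hle, dif_pos hle, hrev]; simp
    · rw [if_neg hle, dif_neg hle, hrev]
      simp only [List.nil_append]
      congr 1
      exact ih (cs.drop (d + 1)).length (by simp; omega) _ rfl _

theorem pvA_eq_alt (S : String) : printMinNumberForPattern S = printMinNumberForPattern_alt S := by
  unfold printMinNumberForPattern printMinNumberForPattern_alt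
  have h := pvFoldA_eq_mix S.toList [] [] 1
  simp only [List.nil_append] at h
  rcases hf : S.toList.foldl pvStepA ([], [], 1) with ⟨result, stack, num⟩
  rw [hf] at h
  simp only [pvFinish] at h
  simp only [h, pvMix_eq_altLoop S.toList.length S.toList rfl 1]

-- ===== VERDICT (by name: the statement is the Claim_ definition above) =====
theorem printMinNumberForPattern_spec : Claim_equal_printMinNumberForPattern := by
  intro S _
  unfold Spec_printMinNumberForPattern
  exact pvA_eq_alt S
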